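-- pv_equiv track=rewrite | github.com/ChrisN-T4D/statassignments | backend/models/bkt_student.py | _max_consecutive_errors
-- ===== SOURCE A (Python) =====
-- from collections import defaultdict
-- from typing import Dict, List, Optional, Tuple
--
-- def _max_consecutive_errors(
--     history: List[Dict]
-- ) -> Tuple[int, str]:
--     """Return (max_streak, kc_id) for the worst consecutive error run."""
--     kc_streaks: Dict[str, int] = defaultdict(int)
--     kc_max: Dict[str, int] = defaultdict(int)
--
--     for interaction in history:
--         kc = str(interaction.get("kc_id", "_unknown"))
--         correct = int(bool(interaction.get("correct", 1)))
--         if correct: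
--             kc_streaks[kc] = 0
--         else:
--             kc_streaks[kc] += 1
--             kc_max[kc] = max(kc_max[kc], kc_streaks[kc])
--
--     if not kc_max:
--         return 0, ""
--     worst_kc = max(kc_max, key=kc_max.get)
--     return kc_max[worst_kc], worst_kc
-- ===== SOURCE B (Python) =====
-- def _max_consecutive_errors(history):
--     """Return (max_streak, kc_id) for the worst consecutive error run.
--
--     Two-phase: one pass groups correctness values per KC (and records KCs in
--     order of their first error); a second pass computes each error-KC's
--     longest run of zeros and keeps the first strict maximum.
--     """
--     groups = {}
--     err_kcs = []
--     for d in history: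
--         kc = str(d.get("kc_id", "_unknown"))
--         c = int(bool(d.get("correct", 1)))
--         groups.setdefault(kc, []).append(c)
--         if c == 0 and kc not in err_kcs:
--             err_kcs.append(kc)
--     best_run, best_kc = 0, ""
--     for kc in err_kcs:
--         run = cur = 0
--         for c in groups[kc]:
--             cur = 0 if c else cur + 1
--             run = max(run, cur)
--         if run > best_run:
--             best_run, best_kc = run, kc
--     return best_run, best_kc
-- ===== Notes on version B (the rewrite author's own statement) =====
-- stated objective: alternative
-- what changed: Replaces A's single interleaved pass over two defaultdicts (running streak and running max per KC, then a key=get argmax) by a group-then-scan decomposition: one pass groups correctness values per KC and records KCs in first-error order, then each error-KC's longest zero run is computed by a separate scan and the first strict maximum is kept.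
import Mathlib
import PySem

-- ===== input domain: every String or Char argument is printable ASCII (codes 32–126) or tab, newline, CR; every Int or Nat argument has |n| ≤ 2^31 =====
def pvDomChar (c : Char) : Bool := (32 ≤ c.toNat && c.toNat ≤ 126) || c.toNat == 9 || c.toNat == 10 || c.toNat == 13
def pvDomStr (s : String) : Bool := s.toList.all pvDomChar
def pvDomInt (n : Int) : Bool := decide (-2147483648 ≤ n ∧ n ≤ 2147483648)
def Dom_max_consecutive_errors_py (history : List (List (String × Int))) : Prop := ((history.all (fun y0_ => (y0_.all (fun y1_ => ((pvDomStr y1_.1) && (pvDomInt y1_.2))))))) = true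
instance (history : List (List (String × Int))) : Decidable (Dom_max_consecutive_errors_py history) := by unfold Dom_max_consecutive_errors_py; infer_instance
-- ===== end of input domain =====

-- B re-decomposes A's single interleaved streak/max pass into group-per-KC then scan-per-KC
-- (same return value; neither program mutates its argument).

-- shared coercions: both Pythons compute str(d.get("kc_id", "_unknown")) and int(bool(d.get("correct", 1)))
def pvKC (d : List (String × Int)) : String :=
  match (PySem.Dict.mk d).get? "kc_id" with
  | some v => PySem.Int.toStr v
  | none => "_unknown"

def pvCorrect (d : List (String × Int)) : Int :=
  match (PySem.Dict.mk d).get? "correct" with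
  | some v => if v == 0 then (0 : Int) else 1
  | none => 1

-- ===== PORT A =====
-- loop body: state = (kc_streaks, kc_max)
def pvStepA (st : PySem.Dict String Int × PySem.Dict String Int)
    (interaction : List (String × Int)) : PySem.Dict String Int × PySem.Dict String Int :=
  let kc := pvKC interaction
  let correct := pvCorrect interaction
  if correct ≠ 0 then
    (st.1.insert kc 0, st.2)
  else
    let s := st.1.getD kc 0 + 1
    (st.1.insert kc s, st.2.insert kc (max (st.2.getD kc 0) s))

def max_consecutive_errors_py (history : List (List (String × Int))) : Int × String :=
  let st := history.foldl pvStepA (PySem.Dict.empty, PySem.Dict.empty)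
  match st.2.items with
  | [] => (0, "")
  | (k0, v0) :: rest =>
      -- max(kc_max, key=kc_max.get): first key with the maximal value
      let worst := rest.foldl (fun (best : String × Int) p => if p.2 > best.2 then p else best) (k0, v0)
      (st.2.getD worst.1 0, worst.1)

-- ===== PORT B =====
-- phase-1 loop body: state = (groups, err_kcs)
def pvStepB (st : PySem.Dict String (List Int) × List String)
    (d : List (String × Int)) : PySem.Dict String (List Int) × List String :=
  let kc := pvKC d
  let c := pvCorrect d
  (st.1.modify kc [] (· ++ [c]),
   if c == 0 && !(st.2.contains kc) then st.2 ++ [kc] else st.2)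

-- run = cur = 0; for c in seq: cur = 0 if c else cur + 1; run = max(run, cur)  — returns (run, cur)
def pvRunScan (seq : List Int) : Int × Int :=
  seq.foldl (fun (p : Int × Int) c =>
    let cur : Int := if c ≠ 0 then 0 else p.2 + 1
    (max p.1 cur, cur)) (0, 0)

def max_consecutive_errors_py_alt (history : List (List (String × Int))) : Int × String :=
  let st := history.foldl pvStepB (PySem.Dict.empty, [])
  -- phase 2: first strict maximum of the per-KC longest zero runs
  st.2.foldl (fun (best : Int × String) kc =>
    let run := (pvRunScan (st.1.getD kc [])).1
    if run > best.1 then (run, kc) else best) (0, "")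

-- ===== PRECONDITION & SPEC =====
def Spec_max_consecutive_errors_py (history : List (List (String × Int))) (out : Int × String) : Prop := out = max_consecutive_errors_py_alt history
instance (history : List (List (String × Int))) (out : Int × String) : Decidable (Spec_max_consecutive_errors_py history out) := by unfold Spec_max_consecutive_errors_py; infer_instance

-- ===== CLAIM (what is proved, stated in full; the proofs are below) =====
def Claim_equal_max_consecutive_errors_py : Prop := ∀ (history : List (List (String × Int))), Dom_max_consecutive_errors_py history → Spec_max_consecutive_errors_py history (max_consecutive_errors_py history)

-- ===== LEMMAS AND PROOFS =====

-- proof-side abstractions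
def pvItems (l : List (List (String × Int))) : List (String × Int) :=
  l.map (fun d => (pvKC d, pvCorrect d))

def pvSeq (items : List (String × Int)) (kc : String) : List Int :=
  (items.filter (fun p => p.1 == kc)).map (·.2)

def pvErrStep (acc : List String) (p : String × Int) : List String :=
  if p.2 == 0 && !(acc.contains p.1) then acc ++ [p.1] else acc

def pvErr (items : List (String × Int)) : List String := items.foldl pvErrStep []

def pvRS (p : Int × Int) (c : Int) : Int × Int :=
  let cur : Int := if c ≠ 0 then 0 else p.2 + 1
  (max p.1 cur, cur)

lemma pvRunScan_eq_foldl (s : List Int) : pvRunScan s = s.foldl pvRS (0, 0) := rfl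

lemma pvRS_fst_mono (s : List Int) (p : Int × Int) : p.1 ≤ (s.foldl pvRS p).1 := by
  induction s generalizing p with
  | nil => simp
  | cons a s ih =>
    refine le_trans ?_ (ih (pvRS p a))
    simp only [pvRS]
    exact le_max_left _ _

lemma pvRunScan_append (s : List Int) (c : Int) :
    pvRunScan (s ++ [c]) =
      if c ≠ 0 then ((pvRunScan s).1, 0)
      else (max (pvRunScan s).1 ((pvRunScan s).2 + 1), (pvRunScan s).2 + 1) := by
  simp only [pvRunScan_eq_foldl, List.foldl_append, List.foldl_cons, List.foldl_nil, pvRS]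
  split_ifs with h
  · exact Prod.ext (max_eq_left (le_trans le_rfl (pvRS_fst_mono s (0,0)))) rfl
  · rfl

lemma pvRS_fst_pos (s : List Int) (p : Int × Int) (hp : 0 ≤ p.2) (h : (0 : Int) ∈ s) :
    1 ≤ (s.foldl pvRS p).1 := by
  induction s generalizing p with
  | nil => simp at h
  | cons a s ih =>
    rcases List.mem_cons.1 h with h0 | hs
    · subst h0
      refine le_trans ?_ (pvRS_fst_mono s (pvRS p 0))
      simp [pvRS]; omega
    · exact ih (pvRS p a) (by simp [pvRS]; split_ifs <;> omega) hs

lemma pvRunScan_fst_pos (s : List Int) (h : (0 : Int) ∈ s) : 1 ≤ (pvRunScan s).1 :=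
  pvRS_fst_pos s (0, 0) le_rfl h

lemma pvRS_fst_const (s : List Int) (p : Int × Int) (hp : 0 ≤ p.1) (h : (0 : Int) ∉ s) :
    (s.foldl pvRS p).1 = p.1 := by
  induction s generalizing p with
  | nil => rfl
  | cons a s ih =>
    have ha : a ≠ 0 := fun e => h (e ▸ List.mem_cons_self)
    have : pvRS p a = (p.1, 0) := by simp [pvRS, ha, max_eq_left hp]
    rw [List.foldl_cons, this, ih (p.1, 0) hp (fun hs => h (List.mem_cons_of_mem a hs))]

lemma pvRunScan_of_not_mem (s : List Int) (h : (0 : Int) ∉ s) : (pvRunScan s).1 = 0 :=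
  pvRS_fst_const s (0, 0) le_rfl h

lemma mem_foldl_pvErrStep (items : List (String × Int)) (acc : List String) (kc : String) :
    kc ∈ items.foldl pvErrStep acc ↔ kc ∈ acc ∨ (kc, 0) ∈ items := by
  induction items generalizing acc with
  | nil => simp
  | cons p items ih =>
    rw [List.foldl_cons, ih]
    simp only [pvErrStep]
    split_ifs with h
    · simp only [Bool.and_eq_true, beq_iff_eq, Bool.not_eq_true', List.contains_eq_mem,
        decide_eq_false_iff_not] at h
      obtain ⟨h2, h1⟩ := h
      constructor
      · rintro (hm | hm)
        · rcases List.mem_append.1 hm with hm | hm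
          · exact Or.inl hm
          · simp at hm
            refine Or.inr (List.mem_cons.2 (Or.inl ?_))
            rw [Prod.ext_iff]
            exact ⟨hm, h2.symm⟩
        · exact Or.inr (List.mem_cons_of_mem _ hm)
      · rintro (hm | hm)
        · exact Or.inl (List.mem_append.2 (Or.inl hm))
        · rcases List.mem_cons.1 hm with hm | hm
          · left; apply List.mem_append.2; right; simp
            have : kc = p.1 := congrArg Prod.fst hm
            exact this
          · exact Or.inr hm
    · simp only [Bool.and_eq_true, beq_iff_eq, Bool.not_eq_true', List.contains_eq_mem,
        decide_eq_false_iff_not, not_and, not_not] at h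
      constructor
      · rintro (hm | hm)
        · exact Or.inl hm
        · exact Or.inr (List.mem_cons_of_mem _ hm)
      · rintro (hm | hm)
        · exact Or.inl hm
        · rcases List.mem_cons.1 hm with hm | hm
          · have h2 : p.2 = 0 := (congrArg Prod.snd hm).symm
            have h1 : kc ∈ acc := by
              have := h h2
              have hk : kc = p.1 := congrArg Prod.fst hm
              rwa [hk]
            exact Or.inl h1
          · exact Or.inr hm

lemma mem_pvErr_iff (items : List (String × Int)) (kc : String) :
    kc ∈ pvErr items ↔ (kc, 0) ∈ items := by
  rw [pvErr, mem_foldl_pvErrStep]; simp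

lemma nodup_foldl_pvErrStep (items : List (String × Int)) (acc : List String) (h : acc.Nodup) :
    (items.foldl pvErrStep acc).Nodup := by
  induction items generalizing acc with
  | nil => simpa
  | cons p items ih =>
    rw [List.foldl_cons]
    refine ih _ ?_
    simp only [pvErrStep]
    split_ifs with hc
    · simp only [Bool.and_eq_true, Bool.not_eq_true', List.contains_eq_mem,
        decide_eq_false_iff_not] at hc
      simp [List.nodup_append, h]
      exact fun a ha e => hc.2 (e ▸ ha)
    · exact h

lemma nodup_pvErr (items : List (String × Int)) : (pvErr items).Nodup :=
  nodup_foldl_pvErrStep items [] List.nodup_nil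

lemma zero_mem_pvSeq_iff (items : List (String × Int)) (kc : String) :
    (0 : Int) ∈ pvSeq items kc ↔ (kc, 0) ∈ items := by
  simp only [pvSeq, List.mem_map, List.mem_filter, beq_iff_eq]
  constructor
  · rintro ⟨p, ⟨hp, h1⟩, h2⟩
    have : p = (kc, 0) := Prod.ext h1 h2
    exact this ▸ hp
  · intro h; exact ⟨(kc, 0), ⟨h, rfl⟩, rfl⟩

lemma pvSeq_append (items : List (String × Int)) (kc : String) (c : Int) (k : String) :
    pvSeq (items ++ [(kc, c)]) k = pvSeq items k ++ (if kc == k then [c] else []) := by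
  simp only [pvSeq, List.filter_append, List.map_append]
  by_cases h : kc = k <;> simp [h]

lemma pvSeq_append_self (items : List (String × Int)) (kc : String) (c : Int) :
    pvSeq (items ++ [(kc, c)]) kc = pvSeq items kc ++ [c] := by
  rw [pvSeq_append]; simp

lemma pvSeq_append_ne (items : List (String × Int)) (kc : String) (c : Int) (k : String)
    (h : kc ≠ k) : pvSeq (items ++ [(kc, c)]) k = pvSeq items k := by
  rw [pvSeq_append]; simp [h]

lemma pvErr_append (items : List (String × Int)) (p : String × Int) :
    pvErr (items ++ [p]) = pvErrStep (pvErr items) p := by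
  simp [pvErr, List.foldl_append]

lemma pvItems_append (l : List (List (String × Int))) (d : List (String × Int)) :
    pvItems (l ++ [d]) = pvItems l ++ [(pvKC d, pvCorrect d)] := by
  simp [pvItems]

-- the main invariant of A's loop
lemma pvInvA (l : List (List (String × Int))) :
    (∀ kc, (l.foldl pvStepA (PySem.Dict.empty, PySem.Dict.empty)).1.getD kc 0
        = (pvRunScan (pvSeq (pvItems l) kc)).2) ∧
    (l.foldl pvStepA (PySem.Dict.empty, PySem.Dict.empty)).2.items
        = (pvErr (pvItems l)).map (fun k => (k, (pvRunScan (pvSeq (pvItems l) k)).1)) := by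
  induction l using List.reverseRecOn with
  | nil =>
    constructor
    · intro kc; simp [pvItems, pvSeq, pvRunScan, PySem.Dict.getD_empty]
    · rfl
  | append_singleton l d ih =>
    obtain ⟨ih1, ih2⟩ := ih
    have hfold : (l ++ [d]).foldl pvStepA (PySem.Dict.empty, PySem.Dict.empty)
        = pvStepA (l.foldl pvStepA (PySem.Dict.empty, PySem.Dict.empty)) d := by
      simp [List.foldl_append]
    set st := l.foldl pvStepA (PySem.Dict.empty, PySem.Dict.empty) with hst
    set kc := pvKC d with hkc
    set c := pvCorrect d with hcdef
    have hkeys : st.2.keys = pvErr (pvItems l) := by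
      simp only [PySem.Dict.keys, ih2, List.map_map]
      have hcomp : ((fun (p : String × Int) => p.1)
          ∘ fun k => (k, (pvRunScan (pvSeq (pvItems l) k)).1)) = id := rfl
      rw [hcomp, List.map_id]
    have hnod : st.2.keys.Nodup := hkeys ▸ nodup_pvErr _
    by_cases hc : c = 0
    · -- error branch
      have hA : pvStepA st d
          = (st.1.insert kc (st.1.getD kc 0 + 1),
             st.2.insert kc (max (st.2.getD kc 0) (st.1.getD kc 0 + 1))) := by
        simp [pvStepA, ← hkc, ← hcdef, hc]
      rw [hfold, hA, pvItems_append, ← hkc, ← hcdef]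
      constructor
      · intro k
        rw [PySem.Dict.getD_insert]
        by_cases hk : k = kc
        · rw [if_pos hk, hk, hc, pvSeq_append_self, pvRunScan_append]
          simp [ih1 kc]
        · rw [if_neg hk, pvSeq_append_ne _ _ _ _ (Ne.symm hk)]
          exact ih1 k
      · by_cases hmem : kc ∈ pvErr (pvItems l)
        · have hcont : st.2.contains kc = true :=
            (PySem.Dict.contains_iff_mem_keys st.2 kc).2 (hkeys ▸ hmem)
          have hmemi : (kc, (pvRunScan (pvSeq (pvItems l) kc)).1) ∈ st.2.items := by
            rw [ih2]
            exact List.mem_map_of_mem hmem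
          have hget : st.2.getD kc 0 = (pvRunScan (pvSeq (pvItems l) kc)).1 :=
            PySem.Dict.getD_of_mem_items st.2 hmemi hnod 0
          have herr : pvErr (pvItems l ++ [(kc, c)]) = pvErr (pvItems l) := by
            rw [pvErr_append]
            simp [pvErrStep, List.contains_eq_mem, hmem]
          rw [PySem.Dict.items_insert_of_contains st.2 _ hcont, herr, ih2, List.map_map]
          apply List.map_congr_left
          intro k hk
          by_cases hkk : k = kc
          · rw [hkk]
            simp only [Function.comp_apply]
            rw [if_pos (by simp : ((kc == kc) = true))]
            rw [hc, pvSeq_append_self, pvRunScan_append]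
            simp [hget, ih1 kc]
          · simp only [Function.comp_apply]
            rw [if_neg (by simp [hkk] : ¬ ((k == kc) = true))]
            rw [pvSeq_append_ne _ _ _ _ (Ne.symm hkk)]
        · have hcont : st.2.contains kc = false := by
            rcases h' : st.2.contains kc with _ | _
            · rfl
            · exact absurd (hkeys ▸ (PySem.Dict.contains_iff_mem_keys st.2 kc).1 h') hmem
          have hget : st.2.getD kc 0 = 0 := PySem.Dict.getD_of_not_contains st.2 0 hcont
          have hnoz : (0 : Int) ∉ pvSeq (pvItems l) kc := fun hz =>
            hmem ((mem_pvErr_iff _ _).2 ((zero_mem_pvSeq_iff _ _).1 hz))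
          have hrun0 : (pvRunScan (pvSeq (pvItems l) kc)).1 = 0 := pvRunScan_of_not_mem _ hnoz
          have herr : pvErr (pvItems l ++ [(kc, c)]) = pvErr (pvItems l) ++ [kc] := by
            rw [pvErr_append]
            simp [pvErrStep, hc, List.contains_eq_mem, hmem]
          rw [PySem.Dict.items_insert_of_not_contains st.2 _ hcont, herr, ih2, List.map_append]
          congr 1
          · apply List.map_congr_left
            intro k hk
            have hkk : k ≠ kc := fun e => hmem (e ▸ hk)
            rw [pvSeq_append_ne _ _ _ _ (Ne.symm hkk)]
          · simp only [List.map_cons, List.map_nil, List.cons.injEq, and_true]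
            rw [hc, pvSeq_append_self, pvRunScan_append]
            simp [hget, hrun0, ih1 kc]
    · -- correct branch (c ≠ 0)
      have hA : pvStepA st d = (st.1.insert kc 0, st.2) := by
        simp [pvStepA, ← hkc, ← hcdef, hc]
      rw [hfold, hA, pvItems_append, ← hkc, ← hcdef]
      constructor
      · intro k
        rw [PySem.Dict.getD_insert]
        by_cases hk : k = kc
        · rw [if_pos hk, hk, pvSeq_append_self, pvRunScan_append]
          simp [hc]
        · rw [if_neg hk, pvSeq_append_ne _ _ _ _ (Ne.symm hk)]
          exact ih1 k
      · have herr : pvErr (pvItems l ++ [(kc, c)]) = pvErr (pvItems l) := by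
          rw [pvErr_append]
          simp [pvErrStep, hc]
        rw [herr, ih2]
        apply List.map_congr_left
        intro k hk
        by_cases hkk : k = kc
        · rw [hkk, pvSeq_append_self, pvRunScan_append]
          simp [hc]
        · rw [pvSeq_append_ne _ _ _ _ (Ne.symm hkk)]

-- B's phase-1 fold, characterized
lemma pvFoldB (l : List (List (String × Int))) :
    l.foldl pvStepB (PySem.Dict.empty, [])
      = ((pvItems l).foldl (fun d p => d.modify p.1 [] (· ++ [p.2])) PySem.Dict.empty,
         pvErr (pvItems l)) := by
  induction l using List.reverseRecOn with
  | nil => rfl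
  | append_singleton l d ih =>
    rw [List.foldl_append, List.foldl_cons, List.foldl_nil, ih, pvItems_append,
      List.foldl_append, List.foldl_cons, List.foldl_nil, pvErr_append]
    rfl

-- B's value, in terms of pvErr / pvSeq
lemma pvAlt_eq (history : List (List (String × Int))) :
    max_consecutive_errors_py_alt history
      = (pvErr (pvItems history)).foldl
          (fun (best : Int × String) kc =>
            if (pvRunScan (pvSeq (pvItems history) kc)).1 > best.1
            then ((pvRunScan (pvSeq (pvItems history) kc)).1, kc) else best) (0, "") := by
  unfold max_consecutive_errors_py_alt
  rw [pvFoldB]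
  have hget : ∀ kc, ((pvItems history).foldl
      (fun d p => d.modify p.1 [] (· ++ [p.2])) PySem.Dict.empty).getD kc []
        = pvSeq (pvItems history) kc := by
    intro kc
    rw [PySem.Dict.getD_foldl_modify_append, PySem.Dict.getD_empty]
    rfl
  simp only [hget]

lemma pvSel_mem (l : List (String × Int)) (b : String × Int) :
    l.foldl (fun best p => if p.2 > best.2 then p else best) b = b
      ∨ l.foldl (fun best p => if p.2 > best.2 then p else best) b ∈ l := by
  induction l generalizing b with
  | nil => exact Or.inl rfl
  | cons p l ih =>
    rw [List.foldl_cons]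
    rcases ih (if p.2 > b.2 then p else b) with h | h
    · rw [h]
      split_ifs with hp
      · exact Or.inr List.mem_cons_self
      · exact Or.inl rfl
    · exact Or.inr (List.mem_cons_of_mem _ h)

lemma pvSwapFold (l : List (String × Int)) (b : String × Int) :
    l.foldl (fun (x : Int × String) p => if p.2 > x.1 then (p.2, p.1) else x) (b.2, b.1)
      = ((l.foldl (fun best p => if p.2 > best.2 then p else best) b).2,
         (l.foldl (fun best p => if p.2 > best.2 then p else best) b).1) := by
  induction l generalizing b with
  | nil => rfl
  | cons p l ih =>
    rw [List.foldl_cons, List.foldl_cons]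
    have : (if p.2 > b.2 then (p.2, p.1) else (b.2, b.1))
        = ((if p.2 > b.2 then p else b).2, (if p.2 > b.2 then p else b).1) := by
      split_ifs <;> rfl
    rw [this, ih]

lemma pvFoldKeyMap (run : String → Int) (l : List String) (b : Int × String) :
    l.foldl (fun best kc => if run kc > best.1 then (run kc, kc) else best) b
      = (l.map (fun k => (k, run k))).foldl
          (fun (x : Int × String) p => if p.2 > x.1 then (p.2, p.1) else x) b := by
  induction l generalizing b with
  | nil => rfl
  | cons k l ih => rw [List.foldl_cons, List.map_cons, List.foldl_cons, ih]

-- ===== VERDICT (by name: the statement is the Claim_ definition above) =====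
theorem max_consecutive_errors_py_spec : Claim_equal_max_consecutive_errors_py := by
  intro history _
  unfold Spec_max_consecutive_errors_py
  obtain ⟨h1, h2⟩ := pvInvA history
  set st := history.foldl pvStepA (PySem.Dict.empty, PySem.Dict.empty) with hst
  set items := pvItems history with hitems
  set f : String → String × Int := fun k => (k, (pvRunScan (pvSeq items k)).1) with hf
  have hkeys : st.2.keys = pvErr items := by
    simp only [PySem.Dict.keys, h2, List.map_map]
    have hcomp : ((fun (p : String × Int) => p.1) ∘ f) = id := rfl
    rw [hcomp, List.map_id]
  have hnod : st.2.keys.Nodup := hkeys ▸ nodup_pvErr _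
  rw [pvAlt_eq]
  rcases herr : pvErr items with _ | ⟨k0, errRest⟩
  · -- no KC ever had an error
    have : st.2.items = [] := by rw [h2, herr]; rfl
    simp only [max_consecutive_errors_py, ← hst, this, List.foldl_nil]
  · have hitems2 : st.2.items = (k0, (pvRunScan (pvSeq items k0)).1) :: errRest.map f := by
      rw [h2, herr, List.map_cons]
    have hk0 : 1 ≤ (pvRunScan (pvSeq items k0)).1 := by
      apply pvRunScan_fst_pos
      rw [zero_mem_pvSeq_iff, ← mem_pvErr_iff, herr]
      exact List.mem_cons_self
    -- reduce A's match
    simp only [max_consecutive_errors_py, ← hst, hitems2]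
    -- reduce B's fold: first step selects (run k0, k0)
    rw [List.foldl_cons]
    have hstep : (if (pvRunScan (pvSeq items k0)).1 > (0 : Int)
        then ((pvRunScan (pvSeq items k0)).1, k0) else ((0 : Int), ""))
        = ((pvRunScan (pvSeq items k0)).1, k0) := by
      rw [if_pos (by omega)]
    rw [hstep, pvFoldKeyMap, ← hf]
    have hswap := pvSwapFold (errRest.map f) (k0, (pvRunScan (pvSeq items k0)).1)
    rw [show ((pvRunScan (pvSeq items k0)).1, k0)
        = ((k0, (pvRunScan (pvSeq items k0)).1).2, (k0, (pvRunScan (pvSeq items k0)).1).1) from rfl,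
      hswap]
    set worst := (errRest.map f).foldl
      (fun best p => if p.2 > best.2 then p else best) (k0, (pvRunScan (pvSeq items k0)).1) with hworst
    have hwmem : (worst.1, worst.2) ∈ st.2.items := by
      rw [hitems2]
      rcases pvSel_mem (errRest.map f) (k0, (pvRunScan (pvSeq items k0)).1) with h | h
      · rw [hworst, h]; exact List.mem_cons_self
      · exact List.mem_cons_of_mem _ (by rwa [hworst])
    have hget : st.2.getD worst.1 0 = worst.2 :=
      PySem.Dict.getD_of_mem_items st.2 hwmem hnod 0
    rw [hget]
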